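-- pv_equiv track=rewrite | github.com/TaeHyoungKwon/Codewars | Baekjoon Online Judge/Sounds fishy!.py | solution
-- ===== SOURCE A (Python) =====
-- from enum import Enum
--
-- class Result(str, Enum):
--     FISH_RISING = "Fish Rising"
--     FISH_DIVING = "Fish Diving"
--     CONSTANT_DEPTH = "Fish At Constant Depth"
--     NO_FISH = "No Fish"
--
-- def solution(depth: list[int]) -> str:
--     if len(set(depth)) == 1:
--         return Result.CONSTANT_DEPTH.value
--
--     all_cases = list(zip(depth, depth[1:]))
--     if all(first < second for first, second in all_cases):
--         return Result.FISH_RISING.value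
--     elif all(first > second for first, second in all_cases):
--         return Result.FISH_DIVING.value
--     else:
--         return Result.NO_FISH.value
-- ===== SOURCE B (Python) =====
-- def solution(depth: list[int]) -> str:
--     u = sorted(set(depth))
--     if len(u) == 1:
--         return "Fish At Constant Depth"
--     if depth == u:
--         return "Fish Rising"
--     if depth == list(reversed(u)):
--         return "Fish Diving"
--     return "No Fish"
-- ===== Notes on version B (the rewrite author's own statement) =====
-- stated objective: alternative
-- what changed: Instead of scanning adjacent pairs with all(), B computes the sorted deduplicated list once and classifies by whole-list equality: strictly rising iff depth equals sorted(set(depth)), strictly diving iff it equals its reverse.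
import Mathlib
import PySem

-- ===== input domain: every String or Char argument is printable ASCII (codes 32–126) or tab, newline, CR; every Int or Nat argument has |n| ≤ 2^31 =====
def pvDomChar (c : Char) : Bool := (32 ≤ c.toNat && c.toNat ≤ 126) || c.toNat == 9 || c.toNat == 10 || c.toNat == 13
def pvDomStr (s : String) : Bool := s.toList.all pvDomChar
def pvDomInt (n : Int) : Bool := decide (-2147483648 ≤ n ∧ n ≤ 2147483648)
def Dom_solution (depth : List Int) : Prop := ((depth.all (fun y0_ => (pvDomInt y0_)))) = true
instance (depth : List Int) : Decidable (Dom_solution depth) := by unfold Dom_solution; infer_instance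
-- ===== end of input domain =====

-- B classifies by comparing the whole list with the sorted deduplicated list (and its
-- reverse) instead of A's adjacent-pair all() scans: a different algorithm, same O(n log n)-ish cost.

-- ===== PORT A =====
def solution (depth : List Int) : String :=
  if (PySem.Set.ofList depth).length = 1 then "Fish At Constant Depth"
  else
    let allCases := depth.zip (PySem.List.slice depth (some 1) none)
    if allCases.all (fun p => decide (p.1 < p.2)) then "Fish Rising"
    else if allCases.all (fun p => decide (p.1 > p.2)) then "Fish Diving"
    else "No Fish"

-- ===== PORT B =====
def solution_alt (depth : List Int) : String :=
  let u := PySem.List.sorted (PySem.Set.ofList depth) (fun x => x) false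
  if u.length = 1 then "Fish At Constant Depth"
  else if depth = u then "Fish Rising"
  else if depth = u.reverse then "Fish Diving"
  else "No Fish"

-- ===== PRECONDITION & SPEC =====
def Spec_solution (depth : List Int) (out : String) : Prop := out = solution_alt depth
instance (depth : List Int) (out : String) : Decidable (Spec_solution depth out) := by unfold Spec_solution; infer_instance

-- ===== CLAIM (what is proved, stated in full; the proofs are below) =====
def Claim_equal_solution : Prop := ∀ (depth : List Int), Dom_solution depth → Spec_solution depth (solution depth)

-- ===== LEMMAS AND PROOFS =====

-- A's adjacent-pair all() scan says Pairwise (transitivity via the chain↔pairwise bridge)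
theorem zip_tail_all_lt_iff (xs : List Int) :
    ((xs.zip xs.tail).all (fun p => decide (p.1 < p.2)) = true) ↔ xs.Pairwise (· < ·) := by
  rw [← List.isChain_iff_pairwise]
  induction xs with
  | nil => simp
  | cons a t ih =>
    cases t with
    | nil => simp
    | cons b t' => simp_all [List.isChain_cons_cons]

theorem zip_tail_all_gt_iff (xs : List Int) :
    ((xs.zip xs.tail).all (fun p => decide (p.1 > p.2)) = true) ↔ xs.Pairwise (· > ·) := by
  rw [← List.isChain_iff_pairwise]
  induction xs with
  | nil => simp
  | cons a t ih =>
    cases t with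
    | nil => simp
    | cons b t' => simp_all [List.isChain_cons_cons]

-- B's equality with sorted(set(depth)) says exactly the same thing
theorem eq_sorted_iff (xs : List Int) :
    xs = PySem.List.sorted (PySem.Set.ofList xs) (fun x => x) false ↔ xs.Pairwise (· < ·) := by
  constructor
  · intro h; rw [h]; exact PySem.List.sorted_ofList_pairwise_lt _
  · intro h
    exact (PySem.List.sorted_eq_of_perm_of_pairwise_lt _ xs _
      (by rw [PySem.Set.ofList_eq_self_of_nodup xs (h.imp ne_of_lt)]) h).symm

theorem eq_sorted_rev_iff (xs : List Int) :
    xs = (PySem.List.sorted (PySem.Set.ofList xs) (fun x => x) false).reverse ↔ xs.Pairwise (· > ·) := by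
  constructor
  · intro h; rw [h, List.pairwise_reverse]
    exact PySem.List.sorted_ofList_pairwise_lt _
  · intro h
    have hu : PySem.List.sorted (PySem.Set.ofList xs) (fun x => x) false = xs.reverse :=
      PySem.List.sorted_eq_of_perm_of_pairwise_lt _ xs.reverse _
        (by rw [PySem.Set.ofList_eq_self_of_nodup xs (h.imp ne_of_gt)]; exact xs.reverse_perm)
        (by rw [List.pairwise_reverse]; exact h)
    rw [hu, List.reverse_reverse]

theorem solution_eq_alt (depth : List Int) : solution depth = solution_alt depth := by
  unfold solution solution_alt
  simp only [PySem.List.slice_from_one, PySem.List.length_sorted]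
  by_cases hc : (PySem.Set.ofList depth).length = 1
  · rw [if_pos hc, if_pos hc]
  · rw [if_neg hc, if_neg hc]
    by_cases hr : depth.Pairwise (· < ·)
    · rw [if_pos ((zip_tail_all_lt_iff depth).mpr hr), if_pos ((eq_sorted_iff depth).mpr hr)]
    · rw [if_neg (fun h => hr ((zip_tail_all_lt_iff depth).mp h)),
          if_neg (fun h => hr ((eq_sorted_iff depth).mp h))]
      by_cases hd : depth.Pairwise (· > ·)
      · rw [if_pos ((zip_tail_all_gt_iff depth).mpr hd), if_pos ((eq_sorted_rev_iff depth).mpr hd)]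
      · rw [if_neg (fun h => hd ((zip_tail_all_gt_iff depth).mp h)),
          if_neg (fun h => hd ((eq_sorted_rev_iff depth).mp h))]

-- ===== VERDICT (by name: the statement is the Claim_ definition above) =====
theorem solution_spec : Claim_equal_solution := by
  intro depth _
  unfold Spec_solution
  exact solution_eq_alt depth
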